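-- pv_equiv track=rewrite | github.com/banlanhat69/QuerryWeb | search_ocr.py | detect_word
-- ===== SOURCE A (Python) =====
-- def detect_word(key: str, finding: str):
--   key_len = len(key)
--   res = key_len
--   if len(finding) == 0: return key_len
--   for i, char in enumerate(finding):
--     wrong = 0
--     for c1, c2 in zip(finding[i:i + key_len], key):
--       if c1 != c2:
--         wrong += 1
--     wrong += (key_len - len(finding[i:i + key_len]))
--     if wrong < res: res = wrong
--   return res
-- ===== SOURCE B (Python) =====
-- def detect_word(key: str, finding: str):
--     key_len = len(key)
--     if not finding:
--         return key_len
--     # index: for each character, the list of positions where it occurs in key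
--     kpos = {}
--     for j, c in enumerate(key):
--         kpos.setdefault(c, []).append(j)
--     # scatter: matches[s] = number of aligned equal characters when key starts at s
--     matches = {}
--     for i, c in enumerate(finding):
--         for j in kpos.get(c, ()):
--             if j <= i:
--                 matches[i - j] = matches.get(i - j, 0) + 1
--     best = 0
--     for s in range(len(finding)):
--         m = matches.get(s, 0)
--         if m > best:
--             best = m
--     return key_len - best
-- ===== Notes on version B (the rewrite author's own statement) =====
-- stated objective: faster
-- what changed: Instead of scanning finding[i:i+len(key)] against key for every start i, B builds a character-to-positions index of the key once and scatter-counts aligned matches per shift into a dict, then returns len(key) minus the best match count.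
import Mathlib
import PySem

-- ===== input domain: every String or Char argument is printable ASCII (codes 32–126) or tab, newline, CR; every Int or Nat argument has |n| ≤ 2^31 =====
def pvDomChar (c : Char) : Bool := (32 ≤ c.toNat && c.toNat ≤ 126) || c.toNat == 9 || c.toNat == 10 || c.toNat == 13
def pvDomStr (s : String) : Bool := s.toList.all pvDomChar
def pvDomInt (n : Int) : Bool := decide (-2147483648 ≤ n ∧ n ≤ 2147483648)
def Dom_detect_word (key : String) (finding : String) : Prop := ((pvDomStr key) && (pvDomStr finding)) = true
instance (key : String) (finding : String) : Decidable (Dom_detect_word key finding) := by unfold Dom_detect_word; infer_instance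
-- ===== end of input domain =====

-- B replaces A's per-alignment slice-vs-key mismatch scan by a character-position
-- index of the key and a scatter count of aligned matches per shift (alternative
-- algorithm; return values proved identical on all inputs).

-- ===== PORT A =====
def detect_word (key : String) (finding : String) : Int :=
  let key_len : Int := PySem.Str.len key
  let res : Int := key_len
  if PySem.Str.len finding = 0 then key_len
  else
    (PySem.List.enumerate finding.toList 0).foldl (fun res p =>
      let sl := PySem.List.slice finding.toList (some p.1) (some (p.1 + key_len))
      let wrong : Int := (sl.zip key.toList).foldl
        (fun w q => if q.1 ≠ q.2 then w + 1 else w) 0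
      let wrong := wrong + (key_len - (sl.length : Int))
      if wrong < res then wrong else res) res

-- ===== PORT B =====
-- B-side helper: for each character, the positions where it occurs in key
def kposF (k : List Char) : PySem.Dict Char (List Int) :=
  (PySem.List.enumerate k 0).foldl
    (fun d p => d.modify p.2 [] (fun l => l ++ [p.1])) PySem.Dict.empty

-- B-side helper: for each shift s, the number of aligned equal characters
def matchdF (k f : List Char) : PySem.Dict Int Int :=
  (PySem.List.enumerate f 0).foldl
    (fun d p => ((kposF k).getD p.2 []).foldl
      (fun d j => if j ≤ p.1 then d.insert (p.1 - j) (d.getD (p.1 - j) 0 + 1) else d) d)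
    PySem.Dict.empty

def detect_word_alt (key : String) (finding : String) : Int :=
  let key_len : Int := PySem.Str.len key
  if PySem.Str.len finding = 0 then key_len
  else
    let best : Int :=
      (PySem.List.pyRange 0 (PySem.Str.len finding) 1).foldl
        (fun best s =>
          let m := (matchdF key.toList finding.toList).getD s 0
          if m > best then m else best) 0
    key_len - best

-- ===== PRECONDITION & SPEC =====
def Spec_detect_word (key : String) (finding : String) (out : Int) : Prop := out = detect_word_alt key finding
instance (key : String) (finding : String) (out : Int) : Decidable (Spec_detect_word key finding out) := by unfold Spec_detect_word; infer_instance

-- ===== CLAIM (what is proved, stated in full; the proofs are below) =====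
def Claim_equal_detect_word : Prop := ∀ (key : String) (finding : String), Dom_detect_word key finding → Spec_detect_word key finding (detect_word key finding)

-- ===== LEMMAS AND PROOFS =====

-- the common characterisation: number of aligned equal characters at shift t
def gcnt (k f : List Char) (t : Nat) : Nat :=
  (List.range f.length).countP (fun i =>
    decide (t ≤ i) && (decide (i - t < k.length) && decide (f.getD i 'a' = k.getD (i - t) 'a')))

-- generic: a running strict min of (m - v x) is m minus a running max of v x
theorem minfold {α : Type} (ts : List α) (v : α → Nat) (m : Nat) :
    ∀ (b : Nat), ts.foldl (fun (r : Int) x =>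
        if ((m : Int) - (v x : Int)) < r then (m : Int) - (v x : Int) else r) ((m : Int) - (b : Int))
      = (m : Int) - ((ts.foldl (fun b x => max b (v x)) b : Nat) : Int) := by
  induction ts with
  | nil => intro b; simp
  | cons x t ih =>
    intro b
    simp only [List.foldl_cons]
    by_cases h : b < v x
    · rw [if_pos (by omega), show max b (v x) = v x by omega]; exact ih (v x)
    · rw [if_neg (by omega), show max b (v x) = b by omega]; exact ih b

-- generic: a running strict max over Int of casted Nat values is the Nat running max
theorem maxfold {α : Type} (ts : List α) (v : α → Nat) :
    ∀ (b : Nat), ts.foldl (fun (r : Int) x =>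
        if r < (v x : Int) then (v x : Int) else r) ((b : Nat) : Int)
      = ((ts.foldl (fun b x => max b (v x)) b : Nat) : Int) := by
  induction ts with
  | nil => intro b; simp
  | cons x t ih =>
    intro b
    simp only [List.foldl_cons]
    by_cases h : b < v x
    · rw [if_pos (by omega), show max b (v x) = v x by omega]; exact ih (v x)
    · rw [if_neg (by omega), show max b (v x) = b by omega]; exact ih b

theorem zip_getD (a b : List Char) :
    a.zip b = (List.range (min a.length b.length)).map (fun u => (a.getD u 'a', b.getD u 'a')) := by
  apply List.ext_getElem
  · simp
  · intro i h1 h2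
    simp only [List.getElem_zip, List.getElem_map, List.getElem_range]
    simp only [List.length_zip] at h1
    rw [List.getD_eq_getElem a 'a' (by omega), List.getD_eq_getElem b 'a' (by omega)]

theorem countP_bool_not (l : List (Char × Char)) (p : Char × Char → Bool) :
    l.countP p + l.countP (fun x => !p x) = l.length := by
  induction l with
  | nil => simp
  | cons x t ih => by_cases h : p x <;> simp [h] <;> omega

theorem countP_shift (n t : Nat) (R : Nat → Bool) (h : t ≤ n) :
    (List.range n).countP (fun i => decide (t ≤ i) && R i)
      = (List.range (n - t)).countP (fun u => R (t + u)) := by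
  obtain ⟨s, rfl⟩ : ∃ s, n = t + s := ⟨n - t, by omega⟩
  rw [List.range_add, List.countP_append, List.countP_map, Nat.add_sub_cancel_left]
  have h1 : (List.range t).countP (fun i => decide (t ≤ i) && R i) = 0 := by
    apply List.countP_eq_zero.mpr
    intro i hi
    simp only [List.mem_range] at hi
    simp only [Bool.and_eq_true, decide_eq_true_iff]
    omega
  rw [h1, Nat.zero_add]
  apply List.countP_congr
  intro u _
  simp [Function.comp]

theorem countP_cap (a m : Nat) (S : Nat → Bool) :
    (List.range a).countP (fun u => decide (u < m) && S u)
      = (List.range (min m a)).countP S := by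
  rcases Nat.lt_or_ge m a with h | h
  case _ =>
    rw [Nat.min_eq_left (by omega)]
    obtain ⟨s, rfl⟩ : ∃ s, a = m + s := ⟨a - m, by omega⟩
    rw [List.range_add, List.countP_append, List.countP_map]
    have h2 : (List.range s).countP ((fun u => decide (u < m) && S u) ∘ (fun x => m + x)) = 0 := by
      apply List.countP_eq_zero.mpr
      intro u _
      simp [Function.comp]
    rw [h2, Nat.add_zero]
    apply List.countP_congr
    intro u hu
    simp only [List.mem_range] at hu
    simp only [Bool.and_eq_true, decide_eq_true_iff]
    constructor
    · rintro ⟨_, hs⟩; exact hs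
    · intro hs; exact ⟨by omega, hs⟩
  case _ =>
    rw [Nat.min_eq_right h]
    apply List.countP_congr
    intro u hu
    simp only [List.mem_range] at hu
    simp only [Bool.and_eq_true, decide_eq_true_iff]
    constructor
    · rintro ⟨_, hs⟩; exact hs
    · intro hs; exact ⟨by omega, hs⟩

-- a nested counting loop counts, for each outer element, its key occurrences
theorem dict_double {β : Type} (L : List β) (g : β → List Int) :
    ∀ (d : PySem.Dict Int Int) (v : Int),
    (L.foldl (fun d p => (g p).foldl (fun d x => d.insert x (d.getD x 0 + 1)) d) d).getD v 0
      = d.getD v 0 + (L.map (fun p => (((g p).count v : Nat) : Int))).sum := by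
  induction L with
  | nil => intro d v; simp
  | cons p t ih =>
    intro d v
    simp only [List.foldl_cons, List.map_cons, List.sum_cons]
    rw [ih, PySem.Dict.getD_foldl_insert_add_one]
    ring

theorem kposF_getD (k : List Char) (c : Char) :
    (kposF k).getD c []
      = ((PySem.List.enumerate k 0).filter (fun p => p.2 == c)).map (fun p => p.1) := by
  unfold kposF
  rw [show (PySem.List.enumerate k 0).foldl (fun d p => d.modify p.2 [] (fun l => l ++ [p.1])) PySem.Dict.empty
      = ((PySem.List.enumerate k 0).map (fun p => (p.2, p.1))).foldl
          (fun d q => d.modify q.1 [] (fun l => l ++ [q.2])) PySem.Dict.empty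
      from (List.foldl_map (f := fun p : Int × Char => (p.2, p.1)) (g := fun d q => PySem.Dict.modify d q.1 [] (fun l => l ++ [q.2]))).symm]
  rw [PySem.Dict.getD_foldl_modify_append]
  simp only [List.filter_map, List.map_map]
  rfl

theorem kposF_mem (k : List Char) (c : Char) (j : Int) :
    j ∈ (kposF k).getD c [] ↔ ∃ u : Nat, u < k.length ∧ j = (u : Int) ∧ k.getD u 'a' = c := by
  rw [kposF_getD]
  simp only [List.mem_map, List.mem_filter, PySem.List.mem_enumerate_iff]
  constructor
  · rintro ⟨p, ⟨⟨u, hu, rfl⟩, hc⟩, rfl⟩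
    simp only [beq_iff_eq] at hc
    exact ⟨u, hu, by simp, by rw [List.getD_eq_getElem _ _ hu]; exact hc⟩
  · rintro ⟨u, hu, rfl, hc⟩
    refine ⟨((u : Int), k[u]), ⟨⟨u, hu, by simp⟩, ?_⟩, rfl⟩
    simp only [beq_iff_eq]
    rw [List.getD_eq_getElem _ _ hu] at hc
    exact hc

theorem kposF_nodup (k : List Char) (c : Char) : ((kposF k).getD c []).Nodup := by
  rw [kposF_getD]
  have h1 : ((PySem.List.enumerate k 0).filter (fun p => p.2 == c)).Pairwise (fun p q => p.1 < q.1) :=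
    (PySem.List.pairwise_lt_enumerate k 0).filter _
  have h2 := (List.pairwise_map (f := fun p : Int × Char => p.1)
    (R := fun a b : Int => a < b)).mpr h1
  exact h2.imp (fun h => ne_of_lt h)

-- one outer step of B's scatter loop contributes 1 to shift t iff the characters align
theorem elemcount (k f : List Char) (t i : Nat) :
    ((((kposF k).getD (f.getD i 'a') []).filter (fun j => decide (j ≤ (i : Int)))).map
        (fun j => (i : Int) - j)).count (t : Int)
      = if (decide (t ≤ i) && (decide (i - t < k.length) && decide (f.getD i 'a' = k.getD (i - t) 'a'))) = true
        then 1 else 0 := by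
  have hinj : Function.Injective (fun j : Int => (i : Int) - j) := fun x y h => by
    simp only at h; omega
  rw [show ((t : Nat) : Int) = (fun j : Int => (i : Int) - j) ((i : Int) - (t : Nat)) by simp]
  rw [List.count_map_of_injective _ _ hinj]
  rw [List.count_filter (by simp)]
  by_cases hmem : ((i : Int) - (t : Nat)) ∈ (kposF k).getD (f.getD i 'a') []
  · rw [List.count_eq_one_of_mem (kposF_nodup k _) hmem]
    obtain ⟨u, hu, heq, hc⟩ := (kposF_mem k _ _).mp hmem
    have ht : t ≤ i := by omega
    have hiu : i - t = u := by omega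
    rw [if_pos]
    simp only [Bool.and_eq_true, decide_eq_true_iff]
    exact ⟨ht, by omega, by rw [hiu, hc]⟩
  · rw [List.count_eq_zero_of_not_mem hmem, if_neg]
    intro hp
    simp only [Bool.and_eq_true, decide_eq_true_iff] at hp
    obtain ⟨ht, hlt, hceq⟩ := hp
    exact hmem ((kposF_mem k _ _).mpr ⟨i - t, hlt, by omega, hceq.symm⟩)

-- B's matches dict holds exactly the aligned-equal-character count per shift
theorem matchdF_getD (k f : List Char) (t : Nat) :
    (matchdF k f).getD (t : Int) 0 = ((gcnt k f t : Nat) : Int) := by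
  unfold matchdF
  rw [PySem.List.foldl_congr_mem _ _
    (fun d (p : Int × Char) =>
      ((((kposF k).getD p.2 []).filter (fun j => decide (j ≤ p.1))).map (fun j => p.1 - j)).foldl
        (fun d x => d.insert x (d.getD x 0 + 1)) d) _
    (by
      intro d p _
      rw [PySem.List.foldl_ite_eq_foldl_filter (p := fun j => j ≤ p.1)
        (f := fun d j => PySem.Dict.insert d (p.1 - j) (PySem.Dict.getD d (p.1 - j) 0 + 1))]
      exact (List.foldl_map (f := fun j => p.1 - j)
        (g := fun d x => PySem.Dict.insert d x (PySem.Dict.getD d x 0 + 1))).symm)]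
  rw [dict_double]
  rw [PySem.Dict.getD_empty, zero_add]
  rw [PySem.List.enumerate_eq_map_pyRange f 'a']
  rw [show PySem.List.len f = ((f.length : Nat) : Int) from rfl]
  rw [PySem.List.pyRange_zero_natCast, List.map_map, List.map_map]
  rw [List.map_congr_left (l := List.range f.length)
    (g := fun i => (((if (decide (t ≤ i) && (decide (i - t < k.length) && decide (f.getD i 'a' = k.getD (i - t) 'a'))) = true then 1 else 0 : Nat)) : Int))
    (h := by
      intro i hi
      simp only [Function.comp_apply, PySem.List.pyGetD_natCast]
      rw [elemcount k f t i])]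
  rw [show (fun i => (((if (decide (t ≤ i) && (decide (i - t < k.length) && decide (f.getD i 'a' = k.getD (i - t) 'a'))) = true then 1 else 0 : Nat)) : Int))
      = (fun i => (if (decide (t ≤ i) && (decide (i - t < k.length) && decide (f.getD i 'a' = k.getD (i - t) 'a'))) = true then (1:Int) else 0)) from by
    funext i; split <;> simp]
  rw [PySem.List.sum_map_ite_one_zero]
  rfl

-- the characterisation, written as A computes it: matches in the zip of slice and key
theorem gcnt_eq_zipcount (k f : List Char) (t : Nat) (ht : t < f.length) :
    gcnt k f t = (((f.drop t).take k.length).zip k).countP (fun q => decide (q.1 = q.2)) := by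
  unfold gcnt
  rw [countP_shift f.length t _ (by omega)]
  rw [List.countP_congr (q := fun u => decide (u < k.length) && decide (f.getD (t + u) 'a' = k.getD u 'a'))
    (by
      intro u hu
      simp only [Bool.and_eq_true, decide_eq_true_iff, Nat.add_sub_cancel_left])]
  rw [countP_cap]
  rw [zip_getD]
  rw [List.countP_map]
  have hlen : (((f.drop t).take k.length).length) = min k.length (f.length - t) := by
    simp [List.length_take, List.length_drop]
  rw [hlen]
  rw [show min (min k.length (f.length - t)) k.length = min k.length (f.length - t) by omega]
  apply List.countP_congr
  intro u hu
  simp only [List.mem_range] at hu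
  simp only [Function.comp_apply, decide_eq_true_iff]
  rw [List.getD_eq_getElem ((f.drop t).take k.length) 'a' (by rw [hlen]; omega)]
  rw [List.getElem_take, List.getElem_drop]
  rw [List.getD_eq_getElem f 'a' (by omega)]

-- A's per-alignment mismatch total equals key length minus the match count
theorem wrongA (k f : List Char) (t : Nat) (ht : t < f.length) :
    ((PySem.List.slice f (some (t : Int)) (some ((t : Int) + (k.length : Int)))).zip k).foldl
        (fun w q => if q.1 ≠ q.2 then w + 1 else w) 0
      + ((k.length : Int) - ((PySem.List.slice f (some (t : Int)) (some ((t : Int) + (k.length : Int)))).length : Int))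
    = (k.length : Int) - ((gcnt k f t : Nat) : Int) := by
  rw [PySem.List.slice_natCast_add]
  rw [PySem.List.foldl_ite_add_one (p := fun q : Char × Char => q.1 ≠ q.2)]
  have hd : (fun q : Char × Char => decide (q.1 ≠ q.2)) = (fun q : Char × Char => !(decide (q.1 = q.2))) := by
    funext q; simp
  rw [hd]
  have hnot := countP_bool_not (((f.drop t).take k.length).zip k) (fun q => decide (q.1 = q.2))
  have hzl : (((f.drop t).take k.length).zip k).length = ((f.drop t).take k.length).length := by
    simp [List.length_zip, List.length_take, List.length_drop]
  have hcle := List.countP_le_length (p := fun q : Char × Char => decide (q.1 = q.2)) (l := ((f.drop t).take k.length).zip k)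
  have hsl : ((f.drop t).take k.length).length ≤ k.length := by
    simp [List.length_take]
  rw [gcnt_eq_zipcount k f t ht]
  omega

theorem detect_word_eq (key finding : String) (h : finding.toList ≠ []) :
    detect_word key finding
      = (key.toList.length : Int)
        - (((List.range finding.toList.length).foldl (fun b t => max b (gcnt key.toList finding.toList t)) 0 : Nat) : Int) := by
  have hn : finding.toList.length ≠ 0 := fun h0 => h (List.eq_nil_of_length_eq_zero h0)
  simp only [detect_word, PySem.Str.len_eq]
  rw [if_neg (by simpa using hn)]
  rw [PySem.List.enumerate_eq_map_pyRange finding.toList 'a']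
  rw [show PySem.List.len finding.toList = ((finding.toList.length : Nat) : Int) from rfl]
  rw [PySem.List.pyRange_zero_natCast, List.map_map, List.foldl_map]
  rw [PySem.List.foldl_congr_mem _ _
    (fun (res : Int) (t : Nat) =>
      if ((key.toList.length : Int) - ((gcnt key.toList finding.toList t : Nat) : Int)) < res
      then (key.toList.length : Int) - ((gcnt key.toList finding.toList t : Nat) : Int) else res) _
    (by
      intro res t htm
      simp only [List.mem_range] at htm
      simp only [Function.comp_apply]
      rw [wrongA key.toList finding.toList t htm])]
  have := minfold (List.range finding.toList.length)
    (fun t => gcnt key.toList finding.toList t) key.toList.length 0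
  simpa using this

theorem detect_word_alt_eq (key finding : String) (h : finding.toList ≠ []) :
    detect_word_alt key finding
      = (key.toList.length : Int)
        - (((List.range finding.toList.length).foldl (fun b t => max b (gcnt key.toList finding.toList t)) 0 : Nat) : Int) := by
  have hn : finding.toList.length ≠ 0 := fun h0 => h (List.eq_nil_of_length_eq_zero h0)
  simp only [detect_word_alt, PySem.Str.len_eq]
  rw [if_neg (by simpa using hn)]
  rw [PySem.List.pyRange_zero_natCast, List.foldl_map]
  rw [PySem.List.foldl_congr_mem _ _
    (fun (best : Int) (t : Nat) =>
      if best < ((gcnt key.toList finding.toList t : Nat) : Int)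
      then ((gcnt key.toList finding.toList t : Nat) : Int) else best) _
    (by
      intro best t _
      simp only []
      rw [matchdF_getD])]
  have := maxfold (List.range finding.toList.length)
    (fun t => gcnt key.toList finding.toList t) 0
  rw [show (0 : Int) = ((0 : Nat) : Int) from rfl]
  rw [this]

-- ===== VERDICT (by name: the statement is the Claim_ definition above) =====
theorem detect_word_spec : Claim_equal_detect_word := by
  intro key finding _
  unfold Spec_detect_word
  by_cases h : finding.toList = []
  · simp [detect_word, detect_word_alt, PySem.Str.len_eq, h]
  · rw [detect_word_eq key finding h, detect_word_alt_eq key finding h]
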